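-- pv_equiv track=rewrite | github.com/forthcoming/algorithm | leet_code.py | leet_code_42
-- ===== SOURCE A (Python) =====
-- def leet_code_42(string):  # 严格递增字符串
--     changes = min_changes = string.count("A")
--     for char in string:  # 假设字符串长度为3,修改后的字符串一定是BBB,ABB,AAB,AAA中的一种,changes代表开头有0到3个A时需要交换的次数
--         # 第几次循环意思是想让前几个字符都变为A
--         if char == "A":
--             changes -= 1
--             min_changes = min(changes, min_changes)
--         else:
--             changes += 1
--     return min_changes
-- ===== SOURCE B (Python) =====
-- def leet_code_42(string):
--     count_b = 0
--     best = 0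
--     for char in string:
--         best = min(best + (1 if char == "A" else 0), count_b)
--         if char != "A":
--             count_b += 1
--     return best
-- ===== Notes on version B (the rewrite author's own statement) =====
-- stated objective: alternative
-- what changed: Replaces the pre-count of letter-A occurrences plus a running balance whose minimum is tracked only at letter-A positions by the classic two-state DP for LeetCode 926: one pass maintaining count_b (non-A chars so far) and best = minimum cost to make the prefix sorted (all A's then all B's).
import Mathlib
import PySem

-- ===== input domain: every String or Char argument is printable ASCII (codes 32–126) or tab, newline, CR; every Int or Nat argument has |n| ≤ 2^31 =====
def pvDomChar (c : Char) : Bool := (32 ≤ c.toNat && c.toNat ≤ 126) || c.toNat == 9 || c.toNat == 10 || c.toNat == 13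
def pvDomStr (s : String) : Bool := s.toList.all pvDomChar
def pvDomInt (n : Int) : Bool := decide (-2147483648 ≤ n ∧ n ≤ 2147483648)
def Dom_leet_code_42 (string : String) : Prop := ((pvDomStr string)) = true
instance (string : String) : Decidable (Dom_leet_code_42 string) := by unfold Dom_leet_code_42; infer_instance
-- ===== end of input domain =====

-- B replaces A's pre-count of 'A's plus a running balance by the classic two-state DP
-- (count_b / best) for this problem; same O(n) cost, different loop state.

-- ===== PORT A =====
-- loop body: if char == 'A': changes -= 1; min_changes = min(changes, min_changes); else: changes += 1
def stepA : Int × Int → Char → Int × Int :=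
  fun st char =>
    if char = 'A' then
      let changes := st.1 - 1
      (changes, min changes st.2)
    else
      (st.1 + 1, st.2)

-- changes = min_changes = string.count("A"); loop; return min_changes
def leet_code_42 (string : String) : Int :=
  let c0 : Int := (PySem.Str.count string "A" : Int)
  (string.toList.foldl stepA (c0, c0)).2

-- ===== PORT B =====
-- loop body: best = min(best + (1 if char == 'A' else 0), count_b); if char != 'A': count_b += 1
def stepB : Int × Int → Char → Int × Int :=
  fun st char =>
    let best := min (st.2 + (if char = 'A' then 1 else 0)) st.1
    (st.1 + (if char ≠ 'A' then 1 else 0), best)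

-- count_b = 0; best = 0; loop; return best
def leet_code_42_alt (string : String) : Int :=
  (string.toList.foldl stepB (0, 0)).2

-- ===== PRECONDITION & SPEC =====
def Spec_leet_code_42 (string : String) (out : Int) : Prop := out = leet_code_42_alt string
instance (string : String) (out : Int) : Decidable (Spec_leet_code_42 string out) := by unfold Spec_leet_code_42; infer_instance

-- ===== CLAIM (what is proved, stated in full; the proofs are below) =====
def Claim_equal_leet_code_42 : Prop := ∀ (string : String), Dom_leet_code_42 string → Spec_leet_code_42 string (leet_code_42 string)

-- ===== LEMMAS AND PROOFS =====

-- count of 'A' in the remaining suffix, the quantity linking the two loop states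
def cntA : List Char → Int
  | [] => 0
  | x :: xs => (if x = 'A' then 1 else 0) + cntA xs

-- A's str.count with a one-char needle walks the string one char at a time
theorem countGo_singleton (v : Char) : ∀ (l : List Char) (fuel acc : Nat),
    l.length ≤ fuel → PySem.Chars.count.go [v] fuel l acc = acc + l.count v := by
  intro l
  induction l with
  | nil => intro fuel acc _; cases fuel <;> simp [PySem.Chars.count.go]
  | cons h t ih =>
    intro fuel acc hf
    cases fuel with
    | zero => simp at hf
    | succ f =>
      simp only [List.length_cons, Nat.succ_le_succ_iff] at hf
      by_cases hv : h = v
      · subst hv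
        simp [PySem.Chars.count.go, List.isPrefixOf, ih f (acc + 1) hf]
        omega
      · have hpre : ([v].isPrefixOf (h :: t)) = false := by
          simp [List.isPrefixOf]; exact fun e => hv e.symm
        simp [PySem.Chars.count.go, hpre, ih f acc hf, hv]

theorem strCountA (s : String) : (PySem.Str.count s "A" : Int) = cntA s.toList := by
  rw [PySem.Str.count_eq, show "A".toList = ['A'] from rfl]
  have h1 : PySem.Chars.count s.toList ['A'] = s.toList.count 'A' := by
    simp only [PySem.Chars.count, List.isEmpty_cons, if_false, Bool.false_eq_true]
    rw [countGo_singleton 'A' s.toList s.toList.length 0 le_rfl]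
    omega
  rw [h1]
  induction s.toList with
  | nil => simp [cntA]
  | cons x xs ih =>
    by_cases hx : x = 'A' <;> simp [cntA, hx, ← ih] <;> omega

-- main invariant: with the states linked through cntA of the remaining suffix
-- (c = cntA l + cb, m = cntA l + b) and b ≤ cb, both folds end with equal minima
theorem inv (l : List Char) : ∀ (c m cb b : Int),
    c = cntA l + cb → m = cntA l + b → b ≤ cb →
    (l.foldl stepA (c, m)).2 = (l.foldl stepB (cb, b)).2 := by
  induction l with
  | nil =>
    intro c m cb b hc hm hb
    simp [cntA] at hm
    simpa using hm
  | cons x xs ih =>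
    intro c m cb b hc hm hb
    simp only [List.foldl_cons]
    by_cases hx : x = 'A'
    · have := ih (c - 1) (min (c - 1) m) cb (min (b + 1) cb)
        (by simp [cntA, hx] at hc; omega)
        (by simp [cntA, hx] at hc hm; omega)
        (by omega)
      simpa [stepA, stepB, hx] using this
    · have := ih (c + 1) m (cb + 1) (min b cb)
        (by simp [cntA, hx] at hc; omega)
        (by simp [cntA, hx] at hm; omega)
        (by omega)
      simpa [stepA, stepB, hx, min_eq_left hb] using this

-- ===== VERDICT (by name: the statement is the Claim_ definition above) =====
theorem leet_code_42_spec : Claim_equal_leet_code_42 := by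
  intro s _
  unfold Spec_leet_code_42 leet_code_42 leet_code_42_alt
  rw [strCountA]
  exact inv s.toList _ _ 0 0 (by omega) (by omega) le_rfl
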